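-- pv_equiv track=rewrite | github.com/Tigxy/SiBraR---Single-Branch-Recommender | utilities/notebook_utils.py | split_sequence_indices
-- ===== SOURCE A (Python) =====
-- def split_sequence_indices(num_items, n):
--     # Calculate the number of items in each part
--     items_per_part = num_items // n
--     remainder = num_items % n
--
--     # Initialize variables
--     start = 0
--     indices = [0]
--
--     # Iterate through each part
--     for i in range(n):
--         # Calculate the end index for the current part
--         end = start + items_per_part + (1 if i < remainder else 0)
--
--         # Add the current end index to the list
--         indices.append(end - 1)
--
--         # Update the start index for the next part
--         start = end
--
--     return indices
-- ===== SOURCE B (Python) =====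
-- def split_sequence_indices(num_items, n):
--     items_per_part = num_items // n
--     remainder = num_items % n
--     return [0] + [k * items_per_part + min(k, remainder) - 1 for k in range(1, n + 1)]
-- ===== Notes on version B (the rewrite author's own statement) =====
-- stated objective: simpler
-- what changed: Replaced the running start-accumulator loop by a closed-form comprehension: the k-th boundary is k*items_per_part + min(k, remainder) - 1, so each index is computed independently.
import Mathlib
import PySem

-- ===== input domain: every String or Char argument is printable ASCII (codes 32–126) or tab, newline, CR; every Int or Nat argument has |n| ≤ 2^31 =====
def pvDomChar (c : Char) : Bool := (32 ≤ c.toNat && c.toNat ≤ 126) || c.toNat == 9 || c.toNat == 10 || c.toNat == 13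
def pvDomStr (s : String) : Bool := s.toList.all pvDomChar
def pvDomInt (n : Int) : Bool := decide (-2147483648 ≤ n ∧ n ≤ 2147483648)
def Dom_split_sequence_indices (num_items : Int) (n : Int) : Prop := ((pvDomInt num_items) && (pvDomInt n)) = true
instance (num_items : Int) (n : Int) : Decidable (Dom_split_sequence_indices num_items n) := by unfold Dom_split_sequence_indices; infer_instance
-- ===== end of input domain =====

-- B replaces A's running start-accumulator loop by a closed-form comprehension
-- (k-th boundary = k*items_per_part + min(k, remainder) - 1); same O(n) cost, simpler.

-- ===== PORT A =====
def split_sequence_indices (num_items : Int) (n : Int) : List Int :=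
  let items_per_part := PySem.Int.floordiv num_items n
  let remainder := PySem.Int.mod num_items n
  let res := (PySem.List.pyRange 0 n 1).foldl
    (fun (st : Int × List Int) i =>
      let e := st.1 + items_per_part + (if i < remainder then 1 else 0)
      (e, st.2 ++ [e - 1]))
    (0, [0])
  res.2

-- ===== PORT B =====
def split_sequence_indices_alt (num_items : Int) (n : Int) : List Int :=
  let items_per_part := PySem.Int.floordiv num_items n
  let remainder := PySem.Int.mod num_items n
  0 :: (PySem.List.pyRange 1 (n + 1) 1).map (fun k => k * items_per_part + min k remainder - 1)

-- ===== PRECONDITION & SPEC =====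
-- Pre_ excludes exactly n = 0, where the Python A raises ZeroDivisionError (and B does too).
def Pre_split_sequence_indices (num_items : Int) (n : Int) : Prop := n ≠ 0
instance (num_items : Int) (n : Int) : Decidable (Pre_split_sequence_indices num_items n) := by unfold Pre_split_sequence_indices; infer_instance
def pvWitness_split_sequence_indices : Int × Int := (10, 3)

def Spec_split_sequence_indices (num_items : Int) (n : Int) (out : List Int) : Prop := out = split_sequence_indices_alt num_items n
instance (num_items : Int) (n : Int) (out : List Int) : Decidable (Spec_split_sequence_indices num_items n out) := by unfold Spec_split_sequence_indices; infer_instance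

-- ===== CLAIM (what is proved, stated in full; the proofs are below) =====
def Claim_equal_split_sequence_indices : Prop := ∀ (num_items : Int) (n : Int), Dom_split_sequence_indices num_items n → Pre_split_sequence_indices num_items n → Spec_split_sequence_indices num_items n (split_sequence_indices num_items n)

-- ===== LEMMAS AND PROOFS =====

-- Loop invariant: after m iterations the accumulator start is m*ipp + min m r and the
-- list is [0] followed by the closed-form boundaries for k = 1 .. m (r ≥ 0 needed).
lemma loop_closed_form (ipp r : Int) (hr : 0 ≤ r) (m : Nat) :
    (List.range m).foldl
      (fun (st : Int × List Int) (i : Nat) =>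
        let e := st.1 + ipp + (if (i : Int) < r then 1 else 0)
        (e, st.2 ++ [e - 1]))
      (0, [0])
    = ((m : Int) * ipp + min (m : Int) r,
       0 :: (List.range m).map (fun (k : Nat) => ((k : Int) + 1) * ipp + min ((k : Int) + 1) r - 1)) := by
  induction m with
  | zero => simp [min_eq_left hr]
  | succ m ih =>
    rw [List.range_succ, List.foldl_append, ih, List.map_append]
    simp only [List.foldl_cons, List.foldl_nil, List.map_cons, List.map_nil]
    have hmin : min ((m : Int) + 1) r = min (m : Int) r + (if (m : Int) < r then 1 else 0) := by
      split_ifs <;> omega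
    rw [List.cons_append]
    simp only [Prod.mk.injEq]
    constructor
    · push_cast
      rw [hmin]; ring
    · have hx : ((m : Int) * ipp + min (m : Int) r + ipp + (if (m : Int) < r then 1 else 0)) - 1
          = ((m : Int) + 1) * ipp + min ((m : Int) + 1) r - 1 := by rw [hmin]; ring
      rw [hx]

-- ===== VERDICT (by name: the statement is the Claim_ definition above) =====
theorem split_sequence_indices_spec : Claim_equal_split_sequence_indices := by
  intro num_items n _ hn
  unfold Spec_split_sequence_indices split_sequence_indices split_sequence_indices_alt
  rcases lt_trichotomy n 0 with h | h | h
  · -- n < 0: both ranges are empty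
    have h1 : PySem.List.pyRange 0 n 1 = [] := by
      rw [PySem.List.pyRange_one]
      simp
      omega
    have h2 : PySem.List.pyRange 1 (n + 1) 1 = [] := by
      rw [PySem.List.pyRange_one]
      simp
      omega
    simp [h1, h2]
  · exact absurd h hn
  · -- n > 0: the remainder is nonnegative, apply the closed form
    have hr : 0 ≤ PySem.Int.mod num_items n := by
      rw [PySem.Int.mod_eq_emod_of_pos (a := num_items) h]
      exact Int.emod_nonneg _ (by omega)
    rw [PySem.List.pyRange_one 0 n, PySem.List.pyRange_one 1 (n + 1)]
    have hn1 : (n + 1 - 1).toNat = n.toNat := by omega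
    rw [hn1]
    simp only [List.foldl_map, List.map_map, Int.sub_zero, zero_add]
    rw [loop_closed_form _ _ hr]
    dsimp only
    congr 1
    apply List.map_congr_left
    intro k _
    simp only [Function.comp_apply]
    rw [show (1 : Int) + (k : Int) = (k : Int) + 1 from by ring]
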